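-- pv_equiv track=rewrite | github.com/GymnasiumSaarburg-Robotik/WRO2023 | test/jsontest.py | get_square_bitmap
-- ===== SOURCE A (Python) =====
-- def get_square_bitmap(bitmap):
--     # Initialize variables
--     height = len(bitmap)
--     width = len(bitmap[0])
--     square_bitmap = [[0] * width for _ in range(height)]
--     rectangles = []
--
--     # Define helper function to draw a filled square in the square_bitmap
--     def draw_square(x, y, size):
--         for i in range(x, x + size):
--             for j in range(y, y + size):
--                 square_bitmap[j][i] = 1
--
--     # Define helper function to find the boundaries of a rectangle
--     def find_boundary(x, y):
--         left, right, up, down = x, x, y, y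
--         stack = [(x, y)]
--         while stack:
--             i, j = stack.pop()
--             if i < 0 or j < 0 or i >= width or j >= height or bitmap[j][i] == 0:
--                 continue
--             bitmap[j][i] = 0  # mark pixel as visited
--             left = min(left, i)
--             right = max(right, i)
--             up = min(up, j)
--             down = max(down, j)
--             stack.append((i - 1, j))
--             stack.append((i + 1, j))
--             stack.append((i, j - 1))
--             stack.append((i, j + 1))
--         return left, right, up, down
--
--     # Iterate through each pixel in the bitmap and find the boundaries of each rectangle
--     for i in range(width):
--         for j in range(height):
--             if bitmap[j][i] == 1:
--                 left, right, up, down = find_boundary(i, j)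
--                 size = max(right - left + 1, down - up + 1)
--                 draw_square(left, up, size)
--
--     return square_bitmap
-- ===== SOURCE B (Python) =====
-- def get_square_bitmap(bitmap):
--     # Non-destructive BFS labelling with one global visited set: collect each
--     # 4-connected nonzero component seeded at a 1-cell, record its bounding
--     # square, then render the whole output grid in one functional pass.
--     # (Unlike the original, this does not mutate `bitmap`.)
--     height = len(bitmap)
--     width = len(bitmap[0])
--     visited = set()
--     squares = []
--     for i in range(width):
--         for j in range(height):
--             if bitmap[j][i] == 1 and (i, j) not in visited:
--                 visited.add((i, j))
--                 queue = [(i, j)]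
--                 comp = []
--                 while queue:
--                     ci, cj = queue.pop(0)
--                     comp.append((ci, cj))
--                     for ni, nj in ((ci - 1, cj), (ci + 1, cj), (ci, cj - 1), (ci, cj + 1)):
--                         if 0 <= ni < width and 0 <= nj < height \
--                                 and (ni, nj) not in visited and bitmap[nj][ni] != 0:
--                             visited.add((ni, nj))
--                             queue.append((ni, nj))
--                 left = min(c[0] for c in comp)
--                 right = max(c[0] for c in comp)
--                 up = min(c[1] for c in comp)
--                 down = max(c[1] for c in comp)
--                 size = max(right - left + 1, down - up + 1)
--                 squares.append((left, up, size))
--     return [[1 if any(l <= i < l + s and u <= j < u + s for (l, u, s) in squares) else 0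
--              for i in range(width)]
--             for j in range(height)]
-- ===== Notes on version B (the rewrite author's own statement) =====
-- stated objective: alternative
-- what changed: Replaces the destructive per-seed stack DFS (which zeroes the input bitmap and paints each square into the output in place) by a non-destructive BFS over one global visited set that collects every component and its bounding square, then renders the whole output grid in a single functional pass; B does not mutate the caller's bitmap.
import Mathlib
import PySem

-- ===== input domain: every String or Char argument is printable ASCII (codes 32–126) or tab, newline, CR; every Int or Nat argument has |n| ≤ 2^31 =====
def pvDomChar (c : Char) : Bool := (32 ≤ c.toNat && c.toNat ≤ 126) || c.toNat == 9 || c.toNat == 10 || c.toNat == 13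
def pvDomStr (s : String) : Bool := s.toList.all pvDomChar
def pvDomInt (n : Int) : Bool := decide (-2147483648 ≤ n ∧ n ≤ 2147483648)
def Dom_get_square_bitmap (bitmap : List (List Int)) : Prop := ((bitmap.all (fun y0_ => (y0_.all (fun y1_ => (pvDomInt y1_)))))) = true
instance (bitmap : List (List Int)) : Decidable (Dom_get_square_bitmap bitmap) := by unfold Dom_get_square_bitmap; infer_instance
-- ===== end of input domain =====

-- B replaces A's destructive stack DFS + in-place square painting by a non-destructive
-- BFS over one global visited set that collects components and bounding squares, then
-- renders the output grid functionally.  A mutates its argument bitmap (zeroes every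
-- visited cell) while B does not; the equivalence proved here is about the RETURN value.

-- shared read/write helpers (exact for the uses below: reads are guarded to be in
-- bounds in both Pythons; writes always have 0 ≤ i, 0 ≤ j)
def pvVal (b : List (List Int)) (j i : Int) : Int :=
  PySem.List.pyGetD ((PySem.List.pyGet? b j).getD []) i 0

def pvSet2 (b : List (List Int)) (j i : Int) (v : Int) : List (List Int) :=
  b.modify j.toNat (fun row => row.set i.toNat v)

-- ===== PORT A =====
-- the `while stack:` loop of find_boundary; fuel only makes the recursion total,
-- the supplied fuel is provably sufficient
def pvFindLoop (width height : Int) :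
    Nat → List (List Int) → Int → Int → Int → Int → List (Int × Int) →
    List (List Int) × Int × Int × Int × Int
  | 0, b, l, r, u, d, _ => (b, l, r, u, d)
  | _ + 1, b, l, r, u, d, [] => (b, l, r, u, d)
  | fuel + 1, b, l, r, u, d, (i, j) :: st =>
    if i < 0 ∨ j < 0 ∨ width ≤ i ∨ height ≤ j ∨ pvVal b j i = 0 then
      pvFindLoop width height fuel b l r u d st
    else
      pvFindLoop width height fuel (pvSet2 b j i 0)
        (min l i) (max r i) (min u j) (max d j)
        ((i, j + 1) :: (i, j - 1) :: (i + 1, j) :: (i - 1, j) :: st)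

-- draw_square
def pvDraw (sb : List (List Int)) (x y size : Int) : List (List Int) :=
  (PySem.List.pyRange x (x + size) 1).foldl (fun sb1 i =>
    (PySem.List.pyRange y (y + size) 1).foldl (fun sb2 j => pvSet2 sb2 j i 1) sb1) sb

-- body of A's double scan, for one pixel (i, j); state = (bitmap, square_bitmap)
def pvAStep (width height : Int) (st : List (List Int) × List (List Int)) (i j : Int) :
    List (List Int) × List (List Int) :=
  if pvVal st.1 j i = 1 then
    let fb := pvFindLoop width height ((width * height).toNat * 4 + 2) st.1 i i j j [(i, j)]
    let l := fb.2.1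
    let r := fb.2.2.1
    let u := fb.2.2.2.1
    let d := fb.2.2.2.2
    let size := max (r - l + 1) (d - u + 1)
    (fb.1, pvDraw st.2 l u size)
  else st

def get_square_bitmap (bitmap : List (List Int)) : List (List Int) :=
  let height : Int := (bitmap.length : Int)
  let width : Int := ((bitmap.headD []).length : Int)
  let sq0 : List (List Int) := List.replicate bitmap.length (List.replicate (bitmap.headD []).length 0)
  ((PySem.List.pyRange 0 width 1).foldl (fun st i =>
      (PySem.List.pyRange 0 height 1).foldl (fun st j => pvAStep width height st i j) st)
    (bitmap, sq0)).2

-- ===== PORT B =====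
def pvNbrs (c : Int × Int) : List (Int × Int) :=
  [(c.1 - 1, c.2), (c.1 + 1, c.2), (c.1, c.2 - 1), (c.1, c.2 + 1)]

-- one neighbour test of B's BFS; state = (visited, queue)
def pvBStepN (b : List (List Int)) (width height : Int)
    (st : PySem.Set (Int × Int) × List (Int × Int)) (n : Int × Int) :
    PySem.Set (Int × Int) × List (Int × Int) :=
  if 0 ≤ n.1 ∧ n.1 < width ∧ 0 ≤ n.2 ∧ n.2 < height ∧ n ∉ st.1 ∧ pvVal b n.2 n.1 ≠ 0 then
    (PySem.Set.add st.1 n, st.2 ++ [n])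
  else st

-- the `while queue:` loop; fuel only makes the recursion total (provably sufficient)
def pvBfsLoop (b : List (List Int)) (width height : Int) :
    Nat → PySem.Set (Int × Int) → List (Int × Int) → List (Int × Int) →
    PySem.Set (Int × Int) × List (Int × Int)
  | 0, vis, _, comp => (vis, comp)
  | _ + 1, vis, [], comp => (vis, comp)
  | fuel + 1, vis, c :: q, comp =>
    let st := (pvNbrs c).foldl (pvBStepN b width height) (vis, q)
    pvBfsLoop b width height fuel st.1 st.2 (comp ++ [c])

-- body of B's double scan, for one pixel (i, j); state = (visited, squares)
def pvBStep (b : List (List Int)) (width height : Int)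
    (st : PySem.Set (Int × Int) × List (Int × Int × Int)) (i j : Int) :
    PySem.Set (Int × Int) × List (Int × Int × Int) :=
  if pvVal b j i = 1 ∧ (i, j) ∉ st.1 then
    let res := pvBfsLoop b width height ((width * height).toNat + 2)
      (PySem.Set.add st.1 (i, j)) [(i, j)] []
    let comp := res.2
    let l := (PySem.List.min? (comp.map Prod.fst) (fun x => x)).getD 0
    let r := (PySem.List.max? (comp.map Prod.fst) (fun x => x)).getD 0
    let u := (PySem.List.min? (comp.map Prod.snd) (fun x => x)).getD 0
    let d := (PySem.List.max? (comp.map Prod.snd) (fun x => x)).getD 0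
    let size := max (r - l + 1) (d - u + 1)
    (res.1, st.2 ++ [(l, u, size)])
  else st

def get_square_bitmap_alt (bitmap : List (List Int)) : List (List Int) :=
  let height : Int := (bitmap.length : Int)
  let width : Int := ((bitmap.headD []).length : Int)
  let squares := ((PySem.List.pyRange 0 width 1).foldl (fun st i =>
      (PySem.List.pyRange 0 height 1).foldl (fun st j => pvBStep bitmap width height st i j) st)
    ((PySem.Set.empty : PySem.Set (Int × Int)), ([] : List (Int × Int × Int)))).2
  (PySem.List.pyRange 0 height 1).map (fun j =>
    (PySem.List.pyRange 0 width 1).map (fun i =>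
      if squares.any (fun s => decide (s.1 ≤ i ∧ i < s.1 + s.2.2 ∧ s.2.1 ≤ j ∧ j < s.2.1 + s.2.2))
      then (1 : Int) else 0))

-- ===== PRECONDITION & SPEC =====
-- closed-form data used by Pre_: the 4-connected nonzero component of a cell,
-- computed as a saturating neighbourhood closure (a fixpoint of the adjacency
-- relation on the input, not a copy of either port's traversal)
def pvGoodB (b : List (List Int)) (w h : Int) (c : Int × Int) : Bool :=
  decide (0 ≤ c.1 ∧ c.1 < w ∧ 0 ≤ c.2 ∧ c.2 < h ∧ pvVal b c.2 c.1 ≠ 0)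

def pvGrow (b : List (List Int)) (w h : Int) (s : PySem.Set (Int × Int)) : PySem.Set (Int × Int) :=
  s.foldl (fun acc c => (pvNbrs c).foldl
    (fun acc n => if pvGoodB b w h n then PySem.Set.add acc n else acc) acc) s

def pvComp (b : List (List Int)) (w h : Int) (a : Int × Int) : List (Int × Int) :=
  (pvGrow b w h)^[w.toNat * h.toNat] [a]

def pvFitsB (b : List (List Int)) (w h : Int) (a : Int × Int) : Bool :=
  let comp := pvComp b w h a
  let l := (comp.map Prod.fst).foldl min a.1
  let r := (comp.map Prod.fst).foldl max a.1
  let u := (comp.map Prod.snd).foldl min a.2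
  let d := (comp.map Prod.snd).foldl max a.2
  let s := max (r - l + 1) (d - u + 1)
  decide (l + s ≤ w ∧ u + s ≤ h)

def pvPreCheck (bitmap : List (List Int)) : Bool :=
  match bitmap with
  | [] => false
  | r0 :: _ =>
    bitmap.all (fun r => r0.length ≤ r.length) &&
    (((List.range r0.length).flatMap (fun i => (List.range bitmap.length).map
        (fun j => ((i : Int), (j : Int))))).all (fun a =>
      if pvVal bitmap a.2 a.1 == 1 then
        pvFitsB bitmap (r0.length : Int) (bitmap.length : Int) a
      else true))

-- Pre_ excludes exactly the inputs on which the Python A raises: the empty bitmap,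
-- a row shorter than row 0 (IndexError while scanning), and bitmaps where the
-- bounding square of some 1-containing component extends past the right or bottom
-- edge (IndexError inside draw_square).
def Pre_get_square_bitmap (bitmap : List (List Int)) : Prop := pvPreCheck bitmap = true
instance (bitmap : List (List Int)) : Decidable (Pre_get_square_bitmap bitmap) := by
  unfold Pre_get_square_bitmap; infer_instance

def pvWitness_get_square_bitmap : List (List Int) := [[1, 0], [0, 1]]

def Spec_get_square_bitmap (bitmap : List (List Int)) (out : List (List Int)) : Prop := out = get_square_bitmap_alt bitmap
instance (bitmap : List (List Int)) (out : List (List Int)) : Decidable (Spec_get_square_bitmap bitmap out) := by unfold Spec_get_square_bitmap; infer_instance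

-- ===== CLAIM (what is proved, stated in full; the proofs are below) =====
def Claim_equal_get_square_bitmap : Prop := ∀ (bitmap : List (List Int)), Dom_get_square_bitmap bitmap → Pre_get_square_bitmap bitmap → Spec_get_square_bitmap bitmap (get_square_bitmap bitmap)


-- ===== LEMMAS AND PROOFS =====

-- ---- generic graph layer: reachability through a cell predicate ----
abbrev pvValid (w h : Int) (c : Int × Int) : Prop := 0 ≤ c.1 ∧ c.1 < w ∧ 0 ≤ c.2 ∧ c.2 < h

abbrev pvGood (b : List (List Int)) (w h : Int) (c : Int × Int) : Prop :=
  pvValid w h c ∧ pvVal b c.2 c.1 ≠ 0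

inductive pvRT (T : Int × Int → Prop) : (Int × Int) → (Int × Int) → Prop
  | base (s : Int × Int) (hs : T s) : pvRT T s s
  | step {s y : Int × Int} (x : Int × Int) (h : pvRT T s y) (hadj : x ∈ pvNbrs y) (hx : T x) :
      pvRT T s x

def pvRS (T : Int × Int → Prop) (srcs : List (Int × Int)) (x : Int × Int) : Prop :=
  ∃ s ∈ srcs, pvRT T s x

lemma pvRT_src {T : Int × Int → Prop} {s x : Int × Int} (h : pvRT T s x) : T s ∧ T x := by
  induction h with
  | base hs => exact ⟨hs, hs⟩
  | step y h hadj hx ih => exact ⟨ih.1, hx⟩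

lemma pvRT_mono {T T' : Int × Int → Prop} (hT : ∀ c, T c → T' c) {s x : Int × Int}
    (h : pvRT T s x) : pvRT T' s x := by
  induction h with
  | base hs => exact pvRT.base _ (hT _ hs)
  | step y h hadj hx ih => exact pvRT.step _ ih hadj (hT _ hx)

lemma pvRT_congr {T T' : Int × Int → Prop} (hT : ∀ c, T c ↔ T' c) {s x : Int × Int} :
    pvRT T s x ↔ pvRT T' s x :=
  ⟨pvRT_mono (fun c h => (hT c).1 h), pvRT_mono (fun c h => (hT c).2 h)⟩

lemma pvRT_trans {T : Int × Int → Prop} {s y x : Int × Int}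
    (h1 : pvRT T s y) (h2 : pvRT T y x) : pvRT T s x := by
  induction h2 with
  | base hs => exact h1
  | step y h hadj hx ih => exact pvRT.step _ ih hadj hx

lemma pvRS_cons_of_dead {T : Int × Int → Prop} {s : Int × Int} {rest : List (Int × Int)}
    (hs : ¬ T s) (x : Int × Int) : pvRS T (s :: rest) x ↔ pvRS T rest x := by
  constructor
  · rintro ⟨s', hs', hr⟩
    rcases List.mem_cons.1 hs' with h | h
    · exact absurd (pvRT_src hr).1 (h ▸ hs)
    · exact ⟨s', h, hr⟩
  · rintro ⟨s', hs', hr⟩; exact ⟨s', List.mem_cons_of_mem _ hs', hr⟩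

lemma pvRS_sources {T : Int × Int → Prop} {l₁ l₂ : List (Int × Int)}
    (h : ∀ s, T s → (s ∈ l₁ ↔ s ∈ l₂)) (x : Int × Int) : pvRS T l₁ x ↔ pvRS T l₂ x := by
  constructor
  · rintro ⟨s, hs, hr⟩; exact ⟨s, (h s (pvRT_src hr).1).1 hs, hr⟩
  · rintro ⟨s, hs, hr⟩; exact ⟨s, (h s (pvRT_src hr).1).2 hs, hr⟩

-- the key step: consuming one live cell from the worklist
lemma pvRS_consume_aux {T : Int × Int → Prop} {c : Int × Int} {rest : List (Int × Int)}
    {s x : Int × Int} (hr : pvRT T s x) :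
    s ∈ c :: rest → (x = c ∨ pvRS (fun y => T y ∧ y ≠ c) (pvNbrs c ++ rest) x) := by
  induction hr with
  | base hs' =>
    intro hs
    by_cases h : s = c
    · exact Or.inl h
    · rcases List.mem_cons.1 hs with h' | h'
      · exact absurd h' h
      · exact Or.inr ⟨s, List.mem_append_right _ h', pvRT.base s ⟨hs', h⟩⟩
  | @step y x h hadj hx ih =>
    intro hs
    by_cases hxc : x = c
    · exact Or.inl hxc
    · rcases ih hs with h' | h'
      · subst h'
        exact Or.inr ⟨x, List.mem_append_left _ hadj, pvRT.base x ⟨hx, hxc⟩⟩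
      · rcases h' with ⟨s'', hs'', hr''⟩
        exact Or.inr ⟨s'', hs'', pvRT.step x hr'' hadj ⟨hx, hxc⟩⟩

lemma pvRS_consume {T : Int × Int → Prop} {c : Int × Int} {rest : List (Int × Int)}
    (hc : T c) (x : Int × Int) :
    pvRS T (c :: rest) x ↔
      x = c ∨ pvRS (fun y => T y ∧ y ≠ c) (pvNbrs c ++ rest) x := by
  constructor
  · rintro ⟨s, hs, hr⟩
    exact pvRS_consume_aux hr hs
  · rintro (rfl | ⟨s, hs, hr⟩)
    · exact ⟨x, List.mem_cons_self, pvRT.base x hc⟩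
    · have hr' : pvRT T s x := pvRT_mono (fun _ h => h.1) hr
      rcases List.mem_append.1 hs with h | h
      · exact ⟨c, List.mem_cons_self,
          pvRT_trans (pvRT.step s (pvRT.base c hc) h (pvRT_src hr').1) hr'⟩
      · exact ⟨s, List.mem_cons_of_mem _ h, hr'⟩

-- ---- cell counting ----
def pvCells (w h : Nat) : List (Int × Int) :=
  ((List.range w) ×ˢ (List.range h)).map (fun p => ((p.1 : Int), (p.2 : Int)))

lemma pvCells_nodup (w h : Nat) : (pvCells w h).Nodup := by
  refine List.Nodup.map ?_ (List.Nodup.product (List.nodup_range) (List.nodup_range))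
  intro p q hpq
  simp only [Prod.ext_iff] at hpq ⊢
  exact ⟨by exact_mod_cast hpq.1, by exact_mod_cast hpq.2⟩

lemma mem_pvCells {w h : Nat} {c : Int × Int} :
    c ∈ pvCells w h ↔ 0 ≤ c.1 ∧ c.1 < (w : Int) ∧ 0 ≤ c.2 ∧ c.2 < (h : Int) := by
  constructor
  · intro hc
    rcases List.mem_map.1 hc with ⟨⟨a, b⟩, hab, rfl⟩
    have hab' := List.pair_mem_product.1 hab
    simp only [List.mem_range] at hab'
    refine ⟨by positivity, ?_, by positivity, ?_⟩ <;> dsimp only [] <;> [exact_mod_cast hab'.1; exact_mod_cast hab'.2]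
  · rintro ⟨h1, h2, h3, h4⟩
    refine List.mem_map.2 ⟨(c.1.toNat, c.2.toNat), List.pair_mem_product.2 ⟨?_, ?_⟩, ?_⟩
    · simp only [List.mem_range]; omega
    · simp only [List.mem_range]; omega
    · simp only [Prod.ext_iff]
      constructor <;> simp <;> omega

lemma pvCells_length (w h : Nat) : (pvCells w h).length = w * h := by
  simp only [pvCells, List.length_map, List.length_product, List.length_range]

lemma countP_update {α : Type} [DecidableEq α] {l : List α} (p p' : α → Bool) {c : α}
    (hnd : l.Nodup) (hc : c ∈ l) (hpc : p c = true) (hpc' : p' c = false)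
    (hother : ∀ x ∈ l, x ≠ c → p' x = p x) :
    (l.filter p').length + 1 = (l.filter p).length := by
  induction l with
  | nil => cases hc
  | cons a t ih =>
    rcases List.mem_cons.1 hc with rfl | hct
    · have hnt : c ∉ t := (List.nodup_cons.1 hnd).1
      have : t.filter p' = t.filter p := by
        apply List.filter_congr
        intro x hx
        exact hother x (List.mem_cons_of_mem _ hx) (fun h => hnt (h ▸ hx))
      simp [hpc, hpc', this]
    · have hac : a ≠ c := fun h => ((List.nodup_cons.1 hnd).1 (h ▸ hct))
      have hpa := hother a List.mem_cons_self hac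
      have := ih (List.nodup_cons.1 hnd).2 hct
        (fun x hx hxc => hother x (List.mem_cons_of_mem _ hx) hxc)
      by_cases h : p a = true <;> simp [hpa, h, this]

-- ---- pvVal / pvSet2 value and shape lemmas ----
lemma pvVal_eq_getD {b : List (List Int)} {j i : Int} (hj : 0 ≤ j) (hi : 0 ≤ i) :
    pvVal b j i = (b.getD j.toNat []).getD i.toNat 0 := by
  unfold pvVal
  rw [show j = (j.toNat : Int) by omega, PySem.List.pyGet?_natCast,
    PySem.List.pyGetD_of_nonneg _ _ hi]
  simp only [List.getD_eq_getElem?_getD]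
  rw [Int.toNat_natCast]

abbrev pvInShape (g : List (List Int)) (i j : Int) : Prop :=
  j.toNat < g.length ∧ i.toNat < (g.getD j.toNat []).length

lemma pvVal_of_not_inShape {g : List (List Int)} {i j : Int} (hj : 0 ≤ j) (hi : 0 ≤ i)
    (h : ¬ pvInShape g i j) : pvVal g j i = 0 := by
  rw [pvVal_eq_getD hj hi]
  unfold pvInShape at h
  push Not at h
  by_cases hjl : j.toNat < g.length
  · exact List.getD_eq_default _ _ (h hjl)
  · rw [show g.getD j.toNat [] = [] from List.getD_eq_default _ _ (by omega)]
    simp [List.getD]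

lemma pvInShape_of_val_ne {g : List (List Int)} {i j : Int} (hj : 0 ≤ j) (hi : 0 ≤ i)
    (h : pvVal g j i ≠ 0) : pvInShape g i j := by
  by_contra hc
  exact h (pvVal_of_not_inShape hj hi hc)

lemma pvSet2_shape (g : List (List Int)) (j i : Int) (v : Int) :
    (pvSet2 g j i v).map List.length = g.map List.length := by
  unfold pvSet2
  apply List.ext_getElem?
  intro k
  simp only [List.getElem?_map, List.getElem?_modify]
  by_cases h : j.toNat = k <;> cases hk : g[k]? <;> simp [h]

lemma pvShape_length {g g' : List (List Int)} (h : g.map List.length = g'.map List.length) :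
    g.length = g'.length := by
  have := congrArg List.length h
  simpa using this

lemma pvShape_row {g g' : List (List Int)} (h : g.map List.length = g'.map List.length)
    (k : Nat) : (g.getD k []).length = (g'.getD k []).length := by
  have hl := pvShape_length h
  by_cases hk : k < g.length
  · have h1 : (g.map List.length)[k]? = (g'.map List.length)[k]? := by rw [h]
    simp only [List.getElem?_map] at h1
    rw [List.getD_eq_getElem _ _ hk, List.getD_eq_getElem _ _ (by omega)]
    have h2 : g[k]? = some (g[k]) := List.getElem?_eq_getElem hk
    have h3 : g'[k]? = some (g'[k]) := List.getElem?_eq_getElem (by omega)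
    rw [h2, h3] at h1
    simpa using h1
  · rw [List.getD_eq_default _ _ (by omega), List.getD_eq_default _ _ (by omega)]

lemma pvInShape_congr {g g' : List (List Int)} (h : g.map List.length = g'.map List.length)
    (i j : Int) : pvInShape g i j ↔ pvInShape g' i j := by
  unfold pvInShape
  rw [pvShape_length h, pvShape_row h]

-- effect of one write sb[j][i] = v on reads (both Pythons only write with 0 ≤ i, 0 ≤ j)
lemma pvVal_set2 {g : List (List Int)} {j i : Int} (hj : 0 ≤ j) (hi : 0 ≤ i) (v : Int)
    {j' i' : Int} (hj' : 0 ≤ j') (hi' : 0 ≤ i') :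
    pvVal (pvSet2 g j i v) j' i' =
      if j' = j ∧ i' = i ∧ pvInShape g i j then v else pvVal g j' i' := by
  rw [pvVal_eq_getD hj' hi', pvVal_eq_getD hj' hi']
  unfold pvSet2
  simp only [List.getD_eq_getElem?_getD, List.getElem?_modify]
  cases hrow : g[j'.toNat]? with
  | none =>
    have hlen : g.length ≤ j'.toNat := by
      have := List.getElem?_eq_none_iff.1 hrow; omega
    have hcond : ¬ (j' = j ∧ i' = i ∧ pvInShape g i j) := by
      rintro ⟨rfl, -, hins⟩
      exact absurd hins.1 (by omega)
    simp [hcond]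
  | some row =>
    have hjlt : j'.toNat < g.length := by
      by_contra hc
      rw [List.getElem?_eq_none_iff.2 (by omega)] at hrow; cases hrow
    rw [show (((fun a => if j.toNat = j'.toNat then a.set i.toNat v else a) <$> some row).getD
        ([] : List Int)) = (if j.toNat = j'.toNat then row.set i.toNat v else row) from rfl]
    simp only [Option.getD_some]
    by_cases hjj : j.toNat = j'.toNat
    · have hjeq : j' = j := by omega
      have hgd : g.getD j.toNat [] = row := by
        rw [hjj, List.getD_eq_getElem?_getD, hrow]; rfl
      rw [if_pos hjj]
      simp only [List.getElem?_set]
      by_cases hii : i.toNat = i'.toNat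
      · have hieq : i' = i := by omega
        rw [if_pos hii]
        by_cases hil : i.toNat < row.length
        · have hins : pvInShape g i j := ⟨by omega, by rw [hgd]; exact hil⟩
          rw [if_pos hil, if_pos ⟨hjeq, hieq, hins⟩]
          rfl
        · have hnins : ¬ (j' = j ∧ i' = i ∧ pvInShape g i j) := by
            rintro ⟨-, -, hins⟩
            have h2 := hins.2
            rw [hgd] at h2
            exact hil h2
          rw [if_neg hil, if_neg hnins,
            show row[i'.toNat]? = none from List.getElem?_eq_none_iff.2 (by omega)]
      · have hnins : ¬ (j' = j ∧ i' = i ∧ pvInShape g i j) := by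
          rintro ⟨-, rfl, -⟩
          exact hii rfl
        rw [if_neg hii, if_neg hnins]
    · have hnins : ¬ (j' = j ∧ i' = i ∧ pvInShape g i j) := by
        rintro ⟨rfl, -, -⟩
        exact hjj rfl
      rw [if_neg hjj, if_neg hnins]

-- ---- counting live cells ----
def pvCnz (b : List (List Int)) (w h : Nat) : Nat :=
  ((pvCells w h).filter (fun c => decide (pvVal b c.2 c.1 ≠ 0))).length

lemma pvCnz_le (b : List (List Int)) (w h : Nat) : pvCnz b w h ≤ w * h :=
  le_trans (List.length_filter_le _ _) (le_of_eq (pvCells_length w h))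

lemma pvRS_congr {T T' : Int × Int → Prop} (hT : ∀ c, T c ↔ T' c) (l : List (Int × Int))
    (x : Int × Int) : pvRS T l x ↔ pvRS T' l x :=
  exists_congr fun _ => and_congr_right fun _ => pvRT_congr hT

lemma pvGood_set2_iff {b : List (List Int)} {w h : Nat} {c0 : Int × Int}
    (hgood : pvGood b (w : Int) (h : Int) c0) (c : Int × Int) :
    pvGood (pvSet2 b c0.2 c0.1 0) (w : Int) (h : Int) c ↔
      (pvGood b (w : Int) (h : Int) c ∧ c ≠ c0) := by
  have h01 : 0 ≤ c0.1 := hgood.1.1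
  have h02 : 0 ≤ c0.2 := hgood.1.2.2.1
  have hins : pvInShape b c0.1 c0.2 := pvInShape_of_val_ne h02 h01 hgood.2
  constructor
  · rintro ⟨hv, hnz⟩
    have hv1 : 0 ≤ c.1 := hv.1
    have hv2 : 0 ≤ c.2 := hv.2.2.1
    rw [pvVal_set2 h02 h01 0 hv2 hv1] at hnz
    by_cases he : c = c0
    · subst he
      rw [if_pos ⟨rfl, rfl, hins⟩] at hnz
      exact absurd rfl hnz
    · have hcnd : ¬ (c.2 = c0.2 ∧ c.1 = c0.1 ∧ pvInShape b c0.1 c0.2) := by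
        rintro ⟨h1, h2, -⟩; exact he (Prod.ext h2 h1)
      rw [if_neg hcnd] at hnz
      exact ⟨⟨hv, hnz⟩, he⟩
  · rintro ⟨⟨hv, hnz⟩, hne⟩
    refine ⟨hv, ?_⟩
    rw [pvVal_set2 h02 h01 0 hv.2.2.1 hv.1,
      if_neg (by rintro ⟨h1, h2, -⟩; exact hne (Prod.ext h2 h1))]
    exact hnz

lemma pvCnz_set2 {b : List (List Int)} {w h : Nat} {c0 : Int × Int}
    (hgood : pvGood b (w : Int) (h : Int) c0) :
    pvCnz (pvSet2 b c0.2 c0.1 0) w h + 1 = pvCnz b w h := by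
  have h01 : 0 ≤ c0.1 := hgood.1.1
  have h02 : 0 ≤ c0.2 := hgood.1.2.2.1
  have hins : pvInShape b c0.1 c0.2 := pvInShape_of_val_ne h02 h01 hgood.2
  refine countP_update _ _ (pvCells_nodup w h)
    (mem_pvCells.2 ⟨hgood.1.1, hgood.1.2.1, hgood.1.2.2.1, hgood.1.2.2.2⟩)
    (by simpa using hgood.2) ?_ ?_
  · simp only [decide_eq_false_iff_not, not_not]
    rw [pvVal_set2 h02 h01 0 h02 h01, if_pos ⟨rfl, rfl, hins⟩]
  · intro x hx hxne
    have hxv := mem_pvCells.1 hx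
    have : pvVal (pvSet2 b c0.2 c0.1 0) x.2 x.1 = pvVal b x.2 x.1 := by
      rw [pvVal_set2 h02 h01 0 hxv.2.2.1 hxv.1,
        if_neg (by rintro ⟨h1, h2, -⟩; exact hxne (Prod.ext h2 h1))]
    simp [this]

-- ---- characterization of the running min/max accumulators ----
def pvMinChar (m a : Int) (f : Int × Int → Int) (R : (Int × Int) → Prop) : Prop :=
  m ≤ a ∧ (m = a ∨ ∃ c, R c ∧ m = f c) ∧ ∀ c, R c → m ≤ f c

def pvMaxChar (m a : Int) (f : Int × Int → Int) (R : (Int × Int) → Prop) : Prop :=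
  a ≤ m ∧ (m = a ∨ ∃ c, R c ∧ m = f c) ∧ ∀ c, R c → f c ≤ m

lemma pvMinChar_of_iff {m a : Int} {f : Int × Int → Int} {R R' : (Int × Int) → Prop}
    (h : ∀ c, R c ↔ R' c) (hm : pvMinChar m a f R') : pvMinChar m a f R := by
  obtain ⟨h1, h2, h3⟩ := hm
  refine ⟨h1, ?_, fun c hc => h3 c ((h c).1 hc)⟩
  rcases h2 with h2 | ⟨c, hc, rfl⟩
  · exact Or.inl h2
  · exact Or.inr ⟨c, (h c).2 hc, rfl⟩

lemma pvMaxChar_of_iff {m a : Int} {f : Int × Int → Int} {R R' : (Int × Int) → Prop}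
    (h : ∀ c, R c ↔ R' c) (hm : pvMaxChar m a f R') : pvMaxChar m a f R := by
  obtain ⟨h1, h2, h3⟩ := hm
  refine ⟨h1, ?_, fun c hc => h3 c ((h c).1 hc)⟩
  rcases h2 with h2 | ⟨c, hc, rfl⟩
  · exact Or.inl h2
  · exact Or.inr ⟨c, (h c).2 hc, rfl⟩

lemma pvMinChar_step {m l : Int} {f : Int × Int → Int} {R R₂ : (Int × Int) → Prop}
    {c0 : Int × Int} (hiff : ∀ x, R x ↔ (x = c0 ∨ R₂ x))
    (h : pvMinChar m (min l (f c0)) f R₂) : pvMinChar m l f R := by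
  obtain ⟨h1, h2, h3⟩ := h
  refine ⟨le_trans h1 (min_le_left _ _), ?_, ?_⟩
  · rcases h2 with h2 | ⟨c, hc, rfl⟩
    · rcases le_total l (f c0) with hl | hl
      · left; omega
      · right; exact ⟨c0, (hiff c0).2 (Or.inl rfl), by omega⟩
    · right; exact ⟨c, (hiff c).2 (Or.inr hc), rfl⟩
  · intro c hc
    rcases (hiff c).1 hc with rfl | hc2
    · exact le_trans h1 (min_le_right _ _)
    · exact h3 c hc2

lemma pvMaxChar_step {m l : Int} {f : Int × Int → Int} {R R₂ : (Int × Int) → Prop}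
    {c0 : Int × Int} (hiff : ∀ x, R x ↔ (x = c0 ∨ R₂ x))
    (h : pvMaxChar m (max l (f c0)) f R₂) : pvMaxChar m l f R := by
  obtain ⟨h1, h2, h3⟩ := h
  refine ⟨le_trans (le_max_left _ _) h1, ?_, ?_⟩
  · rcases h2 with h2 | ⟨c, hc, rfl⟩
    · rcases le_total (f c0) l with hl | hl
      · left; omega
      · right; exact ⟨c0, (hiff c0).2 (Or.inl rfl), by omega⟩
    · right; exact ⟨c, (hiff c).2 (Or.inr hc), rfl⟩
  · intro c hc
    rcases (hiff c).1 hc with rfl | hc2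
    · exact le_trans (le_max_right _ _) h1
    · exact h3 c hc2

lemma pvGuard_iff {b : List (List Int)} {w h : Nat} {i j : Int} :
    (i < 0 ∨ j < 0 ∨ (w : Int) ≤ i ∨ (h : Int) ≤ j ∨ pvVal b j i = 0) ↔
      ¬ pvGood b (w : Int) (h : Int) (i, j) := by
  unfold pvGood pvValid
  dsimp only
  by_cases hv : pvVal b j i = 0
  · simp [hv]
  · simp [hv]
    omega

-- ---- the specification of A's find_boundary loop ----
lemma pvFindLoop_spec (w h : Nat) :
    ∀ (fuel : Nat) (b : List (List Int)) (l r u d : Int) (st : List (Int × Int)),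
      4 * pvCnz b w h + st.length + 1 ≤ fuel →
      ((∀ i j : Int, 0 ≤ i → 0 ≤ j →
          (pvRS (pvGood b (w : Int) (h : Int)) st (i, j) →
            pvVal (pvFindLoop (w : Int) (h : Int) fuel b l r u d st).1 j i = 0) ∧
          (¬ pvRS (pvGood b (w : Int) (h : Int)) st (i, j) →
            pvVal (pvFindLoop (w : Int) (h : Int) fuel b l r u d st).1 j i = pvVal b j i)) ∧
        pvMinChar (pvFindLoop (w : Int) (h : Int) fuel b l r u d st).2.1 l Prod.fst
          (pvRS (pvGood b (w : Int) (h : Int)) st) ∧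
        pvMaxChar (pvFindLoop (w : Int) (h : Int) fuel b l r u d st).2.2.1 r Prod.fst
          (pvRS (pvGood b (w : Int) (h : Int)) st) ∧
        pvMinChar (pvFindLoop (w : Int) (h : Int) fuel b l r u d st).2.2.2.1 u Prod.snd
          (pvRS (pvGood b (w : Int) (h : Int)) st) ∧
        pvMaxChar (pvFindLoop (w : Int) (h : Int) fuel b l r u d st).2.2.2.2 d Prod.snd
          (pvRS (pvGood b (w : Int) (h : Int)) st)) := by
  intro fuel
  induction fuel with
  | zero => intro b l r u d st hf; omega
  | succ fuel ih =>
    intro b l r u d st hf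
    rcases st with _ | ⟨⟨i, j⟩, rest⟩
    · have hR : ∀ x, ¬ pvRS (pvGood b (w : Int) (h : Int)) [] x := by
        rintro x ⟨s, hs, -⟩; cases hs
      simp only [pvFindLoop]
      refine ⟨fun i j hi hj => ⟨fun hr => absurd hr (hR _), fun _ => by trivial⟩, ?_, ?_, ?_, ?_⟩ <;>
        exact ⟨le_refl _, Or.inl rfl, fun c hc => absurd hc (hR c)⟩
    · simp only [pvFindLoop]
      by_cases hg : (i < 0 ∨ j < 0 ∨ (w : Int) ≤ i ∨ (h : Int) ≤ j ∨ pvVal b j i = 0)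
      · rw [if_pos hg]
        have hdead : ¬ pvGood b (w : Int) (h : Int) (i, j) := pvGuard_iff.1 hg
        have hRS := fun x => pvRS_cons_of_dead (rest := rest) hdead x
        have IH := ih b l r u d rest (by simp only [List.length_cons] at hf; omega)
        refine ⟨fun i' j' hi' hj' => ⟨fun hr => (IH.1 i' j' hi' hj').1 ((hRS _).1 hr),
            fun hr => (IH.1 i' j' hi' hj').2 (fun hx => hr ((hRS _).2 hx))⟩,
          pvMinChar_of_iff hRS IH.2.1, pvMaxChar_of_iff hRS IH.2.2.1,
          pvMinChar_of_iff hRS IH.2.2.2.1, pvMaxChar_of_iff hRS IH.2.2.2.2⟩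
      · rw [if_neg hg]
        have hgood : pvGood b (w : Int) (h : Int) (i, j) := by
          by_contra hn; exact hg (pvGuard_iff.2 hn)
        have hi0 : 0 ≤ i := hgood.1.1
        have hj0 : 0 ≤ j := hgood.1.2.2.1
        have hins : pvInShape b i j := pvInShape_of_val_ne hj0 hi0 hgood.2
        have hTiff : ∀ c, pvGood (pvSet2 b j i 0) (w : Int) (h : Int) c ↔
            (pvGood b (w : Int) (h : Int) c ∧ c ≠ (i, j)) :=
          pvGood_set2_iff (c0 := (i, j)) hgood
        have hcnz : pvCnz (pvSet2 b j i 0) w h + 1 = pvCnz b w h :=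
          pvCnz_set2 (c0 := (i, j)) hgood
        have IH := ih (pvSet2 b j i 0) (min l i) (max r i) (min u j) (max d j)
          ((i, j + 1) :: (i, j - 1) :: (i + 1, j) :: (i - 1, j) :: rest)
          (by simp only [List.length_cons] at hf ⊢; omega)
        have hsrc : ∀ s : Int × Int, (s ∈ pvNbrs (i, j) ++ rest) ↔
            (s ∈ ((i, j + 1) :: (i, j - 1) :: (i + 1, j) :: (i - 1, j) :: rest)) := by
          intro s; simp only [pvNbrs, List.mem_append, List.mem_cons]; tauto
        have hRiff : ∀ x, pvRS (pvGood b (w : Int) (h : Int)) ((i, j) :: rest) x ↔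
            (x = (i, j) ∨ pvRS (pvGood (pvSet2 b j i 0) (w : Int) (h : Int))
              ((i, j + 1) :: (i, j - 1) :: (i + 1, j) :: (i - 1, j) :: rest) x) := by
          intro x
          rw [pvRS_consume hgood x]
          refine or_congr Iff.rfl ?_
          rw [pvRS_congr (fun c => (hTiff c).symm) _ x]
          exact pvRS_sources (fun s _ => hsrc s) x
        refine ⟨fun i' j' hi' hj' => ⟨?_, ?_⟩, ?_, ?_, ?_, ?_⟩
        · intro hr
          rcases (hRiff (i', j')).1 hr with heq | hr2
          · by_cases hr2' : pvRS (pvGood (pvSet2 b j i 0) (w : Int) (h : Int))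
                ((i, j + 1) :: (i, j - 1) :: (i + 1, j) :: (i - 1, j) :: rest) (i', j')
            · exact (IH.1 i' j' hi' hj').1 hr2'
            · rw [(IH.1 i' j' hi' hj').2 hr2']
              have he : i' = i ∧ j' = j := by
                rw [Prod.mk.injEq] at heq; exact heq
              rw [pvVal_set2 hj0 hi0 0 hj' hi', if_pos ⟨he.2, he.1, hins⟩]
          · exact (IH.1 i' j' hi' hj').1 hr2
        · intro hr
          have hne : ¬ ((i', j') = (i, j)) := fun he => hr ((hRiff _).2 (Or.inl he))
          have hr2 : ¬ pvRS (pvGood (pvSet2 b j i 0) (w : Int) (h : Int))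
              ((i, j + 1) :: (i, j - 1) :: (i + 1, j) :: (i - 1, j) :: rest) (i', j') :=
            fun h2 => hr ((hRiff _).2 (Or.inr h2))
          rw [(IH.1 i' j' hi' hj').2 hr2, pvVal_set2 hj0 hi0 0 hj' hi',
            if_neg (by rintro ⟨h1, h2, -⟩; exact hne (by rw [Prod.mk.injEq]; exact ⟨h2, h1⟩))]
        · exact pvMinChar_step hRiff IH.2.1
        · exact pvMaxChar_step hRiff IH.2.2.1
        · exact pvMinChar_step hRiff IH.2.2.2.1
        · exact pvMaxChar_step hRiff IH.2.2.2.2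

-- ---- B side: the BFS loop ----
lemma pvNbrs_nodup (c : Int × Int) : (pvNbrs c).Nodup := by
  simp [pvNbrs, Prod.ext_iff]
  omega

lemma pvBStepN_fold (b : List (List Int)) (w h : Nat) :
    ∀ (cand : List (Int × Int)), cand.Nodup → ∀ (vis q : List (Int × Int)),
      cand.foldl (pvBStepN b (w : Int) (h : Int)) (vis, q) =
        (vis ++ cand.filter (fun n => decide (pvGood b (w : Int) (h : Int) n ∧ n ∉ vis)),
         q ++ cand.filter (fun n => decide (pvGood b (w : Int) (h : Int) n ∧ n ∉ vis))) := by
  intro cand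
  induction cand with
  | nil => intro _ vis q; simp
  | cons n cand ih =>
    intro hnd vis q
    have hn : n ∉ cand := (List.nodup_cons.1 hnd).1
    have hfc : ∀ vis' : List (Int × Int), (∀ x, x ≠ n → (x ∈ vis' ↔ x ∈ vis)) →
        cand.filter (fun n' => decide (pvGood b (w : Int) (h : Int) n' ∧ n' ∉ vis')) =
        cand.filter (fun n' => decide (pvGood b (w : Int) (h : Int) n' ∧ n' ∉ vis)) := by
      intro vis' hv
      apply List.filter_congr
      intro x hx
      have hxn : x ≠ n := fun e => hn (e ▸ hx)
      simp only [hv x hxn]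
    simp only [List.foldl_cons, List.filter_cons]
    by_cases hc : pvGood b (w : Int) (h : Int) n ∧ n ∉ vis
    · have hstep : pvBStepN b (w : Int) (h : Int) (vis, q) n = (PySem.Set.add vis n, q ++ [n]) := by
        unfold pvBStepN
        exact if_pos ⟨hc.1.1.1, hc.1.1.2.1, hc.1.1.2.2.1, hc.1.1.2.2.2, hc.2, hc.1.2⟩
      rw [hstep, PySem.Set.add_of_not_mem hc.2,
        ih (List.nodup_cons.1 hnd).2 (vis ++ [n]) (q ++ [n]),
        hfc (vis ++ [n]) (fun x hxn => by simp [List.mem_append, hxn])]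
      rw [if_pos (by simpa using hc)]
      simp [List.append_assoc]
    · have hstep : pvBStepN b (w : Int) (h : Int) (vis, q) n = (vis, q) := by
        unfold pvBStepN
        refine if_neg ?_
        rintro ⟨h1, h2, h3, h4, h5, h6⟩
        exact hc ⟨⟨⟨h1, h2, h3, h4⟩, h6⟩, h5⟩
      rw [hstep, ih (List.nodup_cons.1 hnd).2 vis q, if_neg (by simpa using hc)]

-- ---- counting unvisited cells ----
def pvFree (vis : List (Int × Int)) (w h : Nat) : Nat :=
  ((pvCells w h).filter (fun c => decide (c ∉ vis))).length

lemma pvFree_le (vis : List (Int × Int)) (w h : Nat) : pvFree vis w h ≤ w * h :=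
  le_trans (List.length_filter_le _ _) (le_of_eq (pvCells_length w h))

lemma pvFree_append (b : List (List Int)) {w h : Nat} :
    ∀ {ns : List (Int × Int)} {vis : List (Int × Int)}, ns.Nodup →
      (∀ n ∈ ns, pvGood b (w : Int) (h : Int) n ∧ n ∉ vis) →
      pvFree (vis ++ ns) w h + ns.length = pvFree vis w h := by
  intro ns
  induction ns with
  | nil => intro vis _ _; simp
  | cons n ns ih =>
    intro vis hnd hns
    have hgood := (hns n List.mem_cons_self).1
    have hnv := (hns n List.mem_cons_self).2
    have h1 : pvFree (vis ++ [n]) w h + 1 = pvFree vis w h := by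
      refine countP_update _ _ (pvCells_nodup w h)
        (mem_pvCells.2 ⟨hgood.1.1, hgood.1.2.1, hgood.1.2.2.1, hgood.1.2.2.2⟩)
        (by simpa using hnv) (by simp) ?_
      intro x hx hxn
      simp [List.mem_append, hxn]
    have h2 : pvFree ((vis ++ [n]) ++ ns) w h + ns.length = pvFree (vis ++ [n]) w h := by
      refine ih (List.nodup_cons.1 hnd).2 ?_
      intro n' hn'
      refine ⟨(hns n' (List.mem_cons_of_mem _ hn')).1, ?_⟩
      have hne : n' ≠ n := fun e => (List.nodup_cons.1 hnd).1 (e ▸ hn')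
      simp [List.mem_append, hne, (hns n' (List.mem_cons_of_mem _ hn')).2]
    have h3 : vis ++ n :: ns = (vis ++ [n]) ++ ns := by simp
    rw [h3]
    simp only [List.length_cons]
    omega

-- ---- the specification of B's BFS loop ----
lemma pvBfsLoop_spec (b : List (List Int)) (w h : Nat) :
    ∀ (fuel : Nat) (vis q comp : List (Int × Int)),
      q.Nodup → (∀ c ∈ q, c ∈ vis) → (∀ c ∈ q, pvGood b (w : Int) (h : Int) c) →
      pvFree vis w h + q.length + 1 ≤ fuel →
      ((∀ x, x ∈ (pvBfsLoop b (w : Int) (h : Int) fuel vis q comp).2 ↔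
          (x ∈ comp ∨ pvRS (fun c => pvGood b (w : Int) (h : Int) c ∧ (c ∉ vis ∨ c ∈ q)) q x)) ∧
       (∀ x, x ∈ (pvBfsLoop b (w : Int) (h : Int) fuel vis q comp).1 ↔
          (x ∈ vis ∨ pvRS (fun c => pvGood b (w : Int) (h : Int) c ∧ (c ∉ vis ∨ c ∈ q)) q x))) := by
  intro fuel
  induction fuel with
  | zero => intro vis q comp _ _ _ hf; omega
  | succ fuel ih =>
    intro vis q comp hnd hqv hqg hf
    rcases q with _ | ⟨c, rest⟩
    · have hR : ∀ x T, ¬ pvRS T ([] : List (Int × Int)) x := by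
        rintro x T ⟨s, hs, -⟩; cases hs
      simp only [pvBfsLoop]
      exact ⟨fun x => by simpa using fun hr => absurd hr (hR x _),
        fun x => by simpa using fun hr => absurd hr (hR x _)⟩
    · have hcv : c ∈ vis := hqv c List.mem_cons_self
      have hcg : pvGood b (w : Int) (h : Int) c := hqg c List.mem_cons_self
      have hcr : c ∉ rest := (List.nodup_cons.1 hnd).1
      have hrestnd : rest.Nodup := (List.nodup_cons.1 hnd).2
      have hfold := pvBStepN_fold b w h (pvNbrs c) (pvNbrs_nodup c) vis rest
      simp only [pvBfsLoop, hfold]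
      set ns := (pvNbrs c).filter
        (fun n => decide (pvGood b (w : Int) (h : Int) n ∧ n ∉ vis)) with hnsdef
      have hns : ∀ n ∈ ns, (pvGood b (w : Int) (h : Int) n ∧ n ∉ vis) ∧ n ∈ pvNbrs c := by
        intro n hn
        rw [hnsdef, List.mem_filter] at hn
        exact ⟨of_decide_eq_true hn.2, hn.1⟩
      have hnsnd : ns.Nodup := List.Nodup.filter _ (pvNbrs_nodup c)
      have hcns : c ∉ ns := fun hcn => (hns c hcn).1.2 hcv
      have hT2 := fun x => (pvGood b (w : Int) (h : Int) x ∧ (x ∉ vis ++ ns ∨ x ∈ rest ++ ns))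
      have hTc : pvGood b (w : Int) (h : Int) c ∧ (c ∉ vis ∨ c ∈ c :: rest) :=
        ⟨hcg, Or.inr List.mem_cons_self⟩
      have hT2iff : ∀ x, (pvGood b (w : Int) (h : Int) x ∧ (x ∉ vis ++ ns ∨ x ∈ rest ++ ns)) ↔
          ((pvGood b (w : Int) (h : Int) x ∧ (x ∉ vis ∨ x ∈ c :: rest)) ∧ x ≠ c) := by
        intro x
        by_cases hxc : x = c
        · subst hxc
          simp only [List.mem_append, List.mem_cons]
          constructor
          · rintro ⟨-, hm | hm⟩
            · exact absurd (Or.inl hcv) hm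
            · rcases hm with hm | hm
              · exact absurd hm hcr
              · exact absurd hm hcns
          · rintro ⟨-, hx⟩; exact absurd rfl hx
        · by_cases hxn : x ∈ ns
          · have := (hns x hxn).1
            simp only [List.mem_append, List.mem_cons]
            constructor
            · rintro ⟨hg, -⟩
              exact ⟨⟨hg, Or.inl this.2⟩, hxc⟩
            · rintro ⟨⟨hg, -⟩, -⟩
              exact ⟨hg, Or.inr (Or.inr hxn)⟩
          · simp only [List.mem_append, List.mem_cons]
            constructor
            · rintro ⟨hg, hm⟩
              refine ⟨⟨hg, ?_⟩, hxc⟩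
              rcases hm with hm | hm
              · exact Or.inl (fun hv => hm (Or.inl hv))
              · rcases hm with hm | hm
                · exact Or.inr (Or.inr hm)
                · exact absurd hm hxn
            · rintro ⟨⟨hg, hm⟩, -⟩
              refine ⟨hg, ?_⟩
              rcases hm with hm | hm
              · refine Or.inl (fun hv => ?_)
                rcases hv with h1 | h1
                · exact hm h1
                · exact hxn h1
              · rcases hm with hm | hm
                · exact absurd hm hxc
                · exact Or.inr (Or.inl hm)
      have hsrc2 : ∀ s : Int × Int,
          (pvGood b (w : Int) (h : Int) s ∧ (s ∉ vis ++ ns ∨ s ∈ rest ++ ns)) →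
          ((s ∈ pvNbrs c ++ rest) ↔ (s ∈ rest ++ ns)) := by
        intro s hs
        constructor
        · intro hm
          rcases List.mem_append.1 hm with hm | hm
          · rcases hs.2 with hv | hv
            · refine List.mem_append.2 (Or.inr ?_)
              rw [hnsdef, List.mem_filter]
              refine ⟨hm, decide_eq_true ⟨hs.1, fun hsv => hv (List.mem_append.2 (Or.inl hsv))⟩⟩
            · exact hv
          · exact List.mem_append.2 (Or.inl hm)
        · intro hm
          rcases List.mem_append.1 hm with hm | hm
          · exact List.mem_append.2 (Or.inr hm)
          · exact List.mem_append.2 (Or.inl ((hns s hm).2))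
      have hRiff : ∀ x, pvRS (fun c' => pvGood b (w : Int) (h : Int) c' ∧
            (c' ∉ vis ∨ c' ∈ c :: rest)) (c :: rest) x ↔
          (x = c ∨ pvRS (fun c' => pvGood b (w : Int) (h : Int) c' ∧
            (c' ∉ vis ++ ns ∨ c' ∈ rest ++ ns)) (rest ++ ns) x) := by
        intro x
        rw [pvRS_consume hTc x]
        refine or_congr Iff.rfl ?_
        rw [pvRS_congr (fun c' => (hT2iff c').symm) _ x]
        exact pvRS_sources hsrc2 x
      have hrec1 : (rest ++ ns).Nodup := by
        refine List.Nodup.append hrestnd hnsnd ?_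
        intro x hx1 hx2
        exact (hns x hx2).1.2 (hqv x (List.mem_cons_of_mem _ hx1))
      have hrec2 : ∀ c' ∈ rest ++ ns, c' ∈ vis ++ ns := by
        intro c' hc'
        rcases List.mem_append.1 hc' with hm | hm
        · exact List.mem_append.2 (Or.inl (hqv c' (List.mem_cons_of_mem _ hm)))
        · exact List.mem_append.2 (Or.inr hm)
      have hrec3 : ∀ c' ∈ rest ++ ns, pvGood b (w : Int) (h : Int) c' := by
        intro c' hc'
        rcases List.mem_append.1 hc' with hm | hm
        · exact hqg c' (List.mem_cons_of_mem _ hm)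
        · exact (hns c' hm).1.1
      have hfree : pvFree (vis ++ ns) w h + ns.length = pvFree vis w h :=
        pvFree_append b hnsnd (fun n hn => (hns n hn).1)
      have hrec4 : pvFree (vis ++ ns) w h + (rest ++ ns).length + 1 ≤ fuel := by
        simp only [List.length_append]
        simp only [List.length_cons] at hf
        omega
      have IH := ih (vis ++ ns) (rest ++ ns) (comp ++ [c]) hrec1 hrec2 hrec3 hrec4
      have hnsR : ∀ n ∈ ns, pvRS (fun c' => pvGood b (w : Int) (h : Int) c' ∧
          (c' ∉ vis ∨ c' ∈ c :: rest)) (c :: rest) n := by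
        intro n hn
        exact ⟨c, List.mem_cons_self,
          pvRT.step n (pvRT.base c hTc) ((hns n hn).2) ⟨(hns n hn).1.1, Or.inl (hns n hn).1.2⟩⟩
      constructor
      · intro x
        rw [IH.1 x, hRiff x]
        simp only [List.mem_append, List.mem_singleton]
        constructor
        · rintro (⟨hm | hm⟩ | hr)
          · exact Or.inl hm
          · exact Or.inr (Or.inl hm)
          · exact Or.inr (Or.inr hr)
        · rintro (hm | hm | hr)
          · exact Or.inl (Or.inl hm)
          · exact Or.inl (Or.inr hm)
          · exact Or.inr hr
      · intro x
        rw [IH.2 x]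
        constructor
        · rintro (hv | hr)
          · rcases List.mem_append.1 hv with hm | hm
            · exact Or.inl hm
            · exact Or.inr (hnsR x hm)
          · exact Or.inr ((hRiff x).2 (Or.inr hr))
        · rintro (hv | hr)
          · exact Or.inl (List.mem_append.2 (Or.inl hv))
          · rcases (hRiff x).1 hr with rfl | hr2
            · exact Or.inl (List.mem_append.2 (Or.inl hcv))
            · exact Or.inr hr2

-- ---- painting squares vs rendering ----
abbrev pvCover (S : List (Int × Int × Int)) (i j : Int) : Prop :=
  ∃ q ∈ S, q.1 ≤ i ∧ i < q.1 + q.2.2 ∧ q.2.1 ≤ j ∧ j < q.2.1 + q.2.2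

def pvPaint (g : List (List Int)) (S : List (Int × Int × Int)) : List (List Int) :=
  S.foldl (fun s q => pvDraw s q.1 q.2.1 q.2.2) g

lemma pvFoldShape {α : Type} (step : List (List Int) → α → List (List Int))
    (hstep : ∀ g a, (step g a).map List.length = g.map List.length) :
    ∀ (l : List α) (g : List (List Int)),
      (l.foldl step g).map List.length = g.map List.length := by
  intro l
  induction l with
  | nil => intro g; rfl
  | cons a l ih => intro g; rw [List.foldl_cons, ih (step g a), hstep g a]

lemma pvDraw_shape (g : List (List Int)) (x y s : Int) :
    (pvDraw g x y s).map List.length = g.map List.length := by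
  unfold pvDraw
  apply pvFoldShape
  intro g1 a
  apply pvFoldShape
  intro g2 a2
  exact pvSet2_shape g2 a2 a 1

lemma pvPaint_shape (g : List (List Int)) (S : List (Int × Int × Int)) :
    (pvPaint g S).map List.length = g.map List.length := by
  unfold pvPaint
  apply pvFoldShape
  intro g1 q
  exact pvDraw_shape g1 q.1 q.2.1 q.2.2

lemma pvDrawCol_val (i0 : Int) (hi0 : 0 ≤ i0) (bnd : Int) :
    ∀ (n : Nat) (a : Int) (g : List (List Int)), (bnd - a).toNat = n → 0 ≤ a →
    ∀ {i j : Int}, 0 ≤ i → 0 ≤ j →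
    pvVal ((PySem.List.pyRange a bnd).foldl (fun g2 j2 => pvSet2 g2 j2 i0 1) g) j i =
      if i = i0 ∧ a ≤ j ∧ j < bnd ∧ pvInShape g i j then 1 else pvVal g j i := by
  intro n
  induction n with
  | zero =>
    intro a g hn ha i j hi hj
    have hempty : PySem.List.pyRange a bnd = [] := by
      rw [List.eq_nil_iff_forall_not_mem]
      intro x hx
      rw [PySem.List.mem_pyRange_one] at hx
      omega
    rw [hempty]
    simp only [List.foldl_nil]
    rw [if_neg (by rintro ⟨-, h1, h2, -⟩; omega)]
  | succ n ih =>
    intro a g hn ha i j hi hj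
    have hab : a < bnd := by omega
    rw [PySem.List.pyRange_one_cons hab]
    simp only [List.foldl_cons]
    rw [ih (a + 1) (pvSet2 g a i0 1) (by omega) (by omega) hi hj]
    have hsh := pvSet2_shape g a i0 1
    rw [pvVal_set2 ha hi0 1 hj hi]
    by_cases hC' : i = i0 ∧ a + 1 ≤ j ∧ j < bnd ∧ pvInShape (pvSet2 g a i0 1) i j
    · rw [if_pos hC',
        if_pos ⟨hC'.1, by omega, hC'.2.2.1, ((pvInShape_congr hsh i j).1 hC'.2.2.2)⟩]
    · rw [if_neg hC']
      by_cases hW : j = a ∧ i = i0 ∧ pvInShape g i0 a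
      · have hgoal : i = i0 ∧ a ≤ j ∧ j < bnd ∧ pvInShape g i j := by
          refine ⟨hW.2.1, by omega, by omega, ?_⟩
          rw [hW.2.1, hW.1]
          exact hW.2.2
        rw [if_pos hW, if_pos hgoal]
      · have hneg : ¬ (i = i0 ∧ a ≤ j ∧ j < bnd ∧ pvInShape g i j) := by
          rintro ⟨h1, h2, h3, h4⟩
          by_cases hja : j = a
          · exact hW ⟨hja, h1, by rw [← h1, ← hja]; exact h4⟩
          · exact hC' ⟨h1, by omega, h3, (pvInShape_congr hsh i j).2 h4⟩
        rw [if_neg hW, if_neg hneg]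

lemma pvColFold_shape (g : List (List Int)) (i0 : Int) (l : List Int) :
    (l.foldl (fun g2 j2 => pvSet2 g2 j2 i0 1) g).map List.length = g.map List.length := by
  apply pvFoldShape
  intro g2 a2
  exact pvSet2_shape g2 a2 i0 1

lemma pvDraw_val_aux (y s : Int) (hy : 0 ≤ y) (bnd : Int) :
    ∀ (n : Nat) (a : Int) (g : List (List Int)), (bnd - a).toNat = n → 0 ≤ a →
    ∀ {i j : Int}, 0 ≤ i → 0 ≤ j →
    pvVal ((PySem.List.pyRange a bnd).foldl (fun g1 i2 =>
        (PySem.List.pyRange y (y + s)).foldl (fun g2 j2 => pvSet2 g2 j2 i2 1) g1) g) j i =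
      if a ≤ i ∧ i < bnd ∧ y ≤ j ∧ j < y + s ∧ pvInShape g i j then 1 else pvVal g j i := by
  intro n
  induction n with
  | zero =>
    intro a g hn ha i j hi hj
    have hempty : PySem.List.pyRange a bnd = [] := by
      rw [List.eq_nil_iff_forall_not_mem]
      intro x hx
      rw [PySem.List.mem_pyRange_one] at hx
      omega
    rw [hempty]
    simp only [List.foldl_nil]
    rw [if_neg (by rintro ⟨h1, h2, -⟩; omega)]
  | succ n ih =>
    intro a g hn ha i j hi hj
    have hab : a < bnd := by omega
    rw [PySem.List.pyRange_one_cons hab]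
    simp only [List.foldl_cons]
    set g' := (PySem.List.pyRange y (y + s)).foldl (fun g2 j2 => pvSet2 g2 j2 a 1) g with hg'
    have hsh : g'.map List.length = g.map List.length := pvColFold_shape g a _
    rw [ih (a + 1) g' (by omega) (by omega) hi hj]
    rw [hg', pvDrawCol_val a ha (y + s) (y + s - y).toNat y g rfl hy hi hj]
    by_cases hC' : a + 1 ≤ i ∧ i < bnd ∧ y ≤ j ∧ j < y + s ∧ pvInShape g' i j
    · rw [if_pos hC', if_pos ⟨by omega, hC'.2.1, hC'.2.2.1, hC'.2.2.2.1,
        (pvInShape_congr hsh i j).1 hC'.2.2.2.2⟩]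
    · rw [if_neg hC']
      by_cases hW : i = a ∧ y ≤ j ∧ j < y + s ∧ pvInShape g i j
      · have hgoal : a ≤ i ∧ i < bnd ∧ y ≤ j ∧ j < y + s ∧ pvInShape g i j :=
          ⟨by omega, by omega, hW.2.1, hW.2.2.1, hW.2.2.2⟩
        rw [if_pos hW, if_pos hgoal]
      · have hneg : ¬ (a ≤ i ∧ i < bnd ∧ y ≤ j ∧ j < y + s ∧ pvInShape g i j) := by
          rintro ⟨h1, h2, h3, h4, h5⟩
          by_cases hia : i = a
          · exact hW ⟨hia, h3, h4, h5⟩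
          · exact hC' ⟨by omega, h2, h3, h4, (pvInShape_congr hsh i j).2 h5⟩
        rw [if_neg hW, if_neg hneg]

lemma pvDraw_val {x y s : Int} (hx : 0 ≤ x) (hy : 0 ≤ y) (g : List (List Int))
    {i j : Int} (hi : 0 ≤ i) (hj : 0 ≤ j) :
    pvVal (pvDraw g x y s) j i =
      if x ≤ i ∧ i < x + s ∧ y ≤ j ∧ j < y + s ∧ pvInShape g i j then 1 else pvVal g j i := by
  unfold pvDraw
  exact pvDraw_val_aux y s hy (x + s) (x + s - x).toNat x g rfl hx hi hj

lemma pvPaint_val :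
    ∀ (S : List (Int × Int × Int)), (∀ q ∈ S, 0 ≤ q.1 ∧ 0 ≤ q.2.1) →
    ∀ (g : List (List Int)) {i j : Int}, 0 ≤ i → 0 ≤ j →
    pvVal (pvPaint g S) j i =
      if pvCover S i j ∧ pvInShape g i j then 1 else pvVal g j i := by
  intro S
  induction S with
  | nil =>
    intro _ g i j hi hj
    rw [if_neg (by rintro ⟨⟨q, hq, -⟩, -⟩; cases hq)]
    rfl
  | cons q S ih =>
    intro hS g i j hi hj
    have hq0 := hS q List.mem_cons_self
    have hpc : pvPaint g (q :: S) = pvPaint (pvDraw g q.1 q.2.1 q.2.2) S := rfl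
    rw [hpc, ih (fun q' hq' => hS q' (List.mem_cons_of_mem _ hq')) _ hi hj]
    have hsh := pvDraw_shape g q.1 q.2.1 q.2.2
    rw [pvDraw_val hq0.1 hq0.2 g hi hj]
    by_cases hC' : pvCover S i j ∧ pvInShape (pvDraw g q.1 q.2.1 q.2.2) i j
    · have : pvCover (q :: S) i j ∧ pvInShape g i j := by
        obtain ⟨⟨q', hq', hc⟩, hin⟩ := hC'
        exact ⟨⟨q', List.mem_cons_of_mem _ hq', hc⟩, (pvInShape_congr hsh i j).1 hin⟩
      rw [if_pos hC', if_pos this]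
    · rw [if_neg hC']
      by_cases hW : q.1 ≤ i ∧ i < q.1 + q.2.2 ∧ q.2.1 ≤ j ∧ j < q.2.1 + q.2.2 ∧ pvInShape g i j
      · have : pvCover (q :: S) i j ∧ pvInShape g i j :=
          ⟨⟨q, List.mem_cons_self, hW.1, hW.2.1, hW.2.2.1, hW.2.2.2.1⟩, hW.2.2.2.2⟩
        rw [if_pos hW, if_pos this]
      · have hneg : ¬ (pvCover (q :: S) i j ∧ pvInShape g i j) := by
          rintro ⟨⟨q', hq', hc⟩, hin⟩
          rcases List.mem_cons.1 hq' with rfl | hq'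
          · exact hW ⟨hc.1, hc.2.1, hc.2.2.1, hc.2.2.2, hin⟩
          · exact hC' ⟨⟨q', hq', hc⟩, (pvInShape_congr hsh i j).2 hin⟩
        rw [if_neg hW, if_neg hneg]

lemma pvVal_natCast (g : List (List Int)) (k m : Nat) :
    pvVal g (k : Int) (m : Int) = (g.getD k []).getD m 0 := by
  rw [pvVal_eq_getD (by positivity) (by positivity)]
  simp

lemma pvPaint_render (W H : Nat) (S : List (Int × Int × Int))
    (hS : ∀ q ∈ S, 0 ≤ q.1 ∧ 0 ≤ q.2.1) :
    pvPaint (List.replicate H (List.replicate W (0 : Int))) S =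
      (PySem.List.pyRange 0 (H : Int)).map (fun j =>
        (PySem.List.pyRange 0 (W : Int)).map (fun i =>
          if S.any (fun q => decide (q.1 ≤ i ∧ i < q.1 + q.2.2 ∧ q.2.1 ≤ j ∧ j < q.2.1 + q.2.2))
          then (1 : Int) else 0)) := by
  have hsh := pvPaint_shape (List.replicate H (List.replicate W (0 : Int))) S
  have hlen : (pvPaint (List.replicate H (List.replicate W (0 : Int))) S).length = H := by
    have := pvShape_length hsh
    simpa using this
  have hrow : ∀ k : Nat,
      ((pvPaint (List.replicate H (List.replicate W (0 : Int))) S).getD k []).length =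
        ((List.replicate H (List.replicate W (0 : Int))).getD k []).length :=
    fun k => pvShape_row hsh k
  rw [PySem.List.pyRange_zero_natCast H, PySem.List.pyRange_zero_natCast W, List.map_map]
  apply List.ext_getElem
  · simpa using hlen
  · intro k h1 h2
    simp only [List.getElem_map, List.getElem_range, Function.comp_apply]
    have hkH : k < H := by simpa using h2
    apply List.ext_getElem
    · have := hrow k
      rw [List.getD_eq_getElem _ _ h1] at this
      rw [this]
      simp [List.length_replicate, hkH]
    · intro m hm1 hm2
      have hmW : m < W := by
        have := hrow k
        rw [List.getD_eq_getElem _ _ h1] at this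
        rw [this] at hm1
        simpa [List.getD_eq_getElem, hkH] using hm1
      simp only [List.getElem_map, List.getElem_range]
      have hval : pvVal (pvPaint (List.replicate H (List.replicate W (0 : Int))) S)
          (k : Int) (m : Int) =
          ((pvPaint (List.replicate H (List.replicate W (0 : Int))) S)[k]'h1)[m]'hm1 := by
        rw [pvVal_natCast, List.getD_eq_getElem _ _ h1, List.getD_eq_getElem _ _ hm1]
      rw [← hval, pvPaint_val S hS _ (by positivity) (by positivity)]
      have hin : pvInShape (List.replicate H (List.replicate W (0 : Int)))
          (m : Int) (k : Int) := by
        refine ⟨by simpa using hkH, ?_⟩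
        rw [Int.toNat_natCast, Int.toNat_natCast,
          List.getD_eq_getElem _ _ (by simpa using hkH)]
        simpa using hmW
      have hzero : pvVal (List.replicate H (List.replicate W (0 : Int))) (k : Int) (m : Int) = 0 := by
        rw [pvVal_natCast]
        simp [List.getD_eq_getElem?_getD, hkH, hmW]
      have hany : (S.any (fun q => decide (q.1 ≤ (m : Int) ∧ (m : Int) < q.1 + q.2.2 ∧
          q.2.1 ≤ (k : Int) ∧ (k : Int) < q.2.1 + q.2.2)) = true) ↔
          pvCover S (m : Int) (k : Int) := by
        simp [List.any_eq_true]
      by_cases hcv : pvCover S (m : Int) (k : Int)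
      · rw [if_pos ⟨hcv, hin⟩, if_pos (hany.2 hcv)]
      · rw [if_neg (by rintro ⟨hc, -⟩; exact hcv hc), hzero,
          if_neg (fun hc => hcv (hany.1 hc))]

-- ---- extrema over the component list vs accumulator characterization ----
lemma pvMin_eq {R : (Int × Int) → Prop} {comp : List (Int × Int)} {f : Int × Int → Int}
    {a m : Int} {seed : Int × Int}
    (hcomp : ∀ x, x ∈ comp ↔ R x) (hsd : R seed) (ha : f seed = a)
    (hm : pvMinChar m a f R) :
    (PySem.List.min? (comp.map f) (fun x => x)).getD 0 = m := by
  have hsdc : seed ∈ comp := (hcomp seed).2 hsd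
  cases hq : PySem.List.min? (comp.map f) (fun x => x) with
  | none =>
    have : comp.map f = [] := (PySem.List.min?_eq_none_iff _ _).1 hq
    rw [List.map_eq_nil_iff] at this
    rw [this] at hsdc
    cases hsdc
  | some v =>
    have hvmem := PySem.List.min?_mem hq
    have hvmin := PySem.List.min?_isMin hq
    obtain ⟨c, hc, rfl⟩ := List.mem_map.1 hvmem
    simp only [Option.getD_some]
    have h1 : m ≤ f c := hm.2.2 c ((hcomp c).1 hc)
    have h2 : f c ≤ m := by
      rcases hm.2.1 with he | ⟨c', hc', he⟩
      · have := hvmin (f seed) (List.mem_map_of_mem hsdc)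
        omega
      · have := hvmin (f c') (List.mem_map_of_mem ((hcomp c').2 hc'))
        omega
    omega

lemma pvMax_eq {R : (Int × Int) → Prop} {comp : List (Int × Int)} {f : Int × Int → Int}
    {a m : Int} {seed : Int × Int}
    (hcomp : ∀ x, x ∈ comp ↔ R x) (hsd : R seed) (ha : f seed = a)
    (hm : pvMaxChar m a f R) :
    (PySem.List.max? (comp.map f) (fun x => x)).getD 0 = m := by
  have hsdc : seed ∈ comp := (hcomp seed).2 hsd
  cases hq : PySem.List.max? (comp.map f) (fun x => x) with
  | none =>
    have : comp.map f = [] := (PySem.List.max?_eq_none_iff _ _).1 hq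
    rw [List.map_eq_nil_iff] at this
    rw [this] at hsdc
    cases hsdc
  | some v =>
    have hvmem := PySem.List.max?_mem hq
    have hvmax := PySem.List.max?_isMax hq
    obtain ⟨c, hc, rfl⟩ := List.mem_map.1 hvmem
    simp only [Option.getD_some]
    have h1 : f c ≤ m := hm.2.2 c ((hcomp c).1 hc)
    have h2 : m ≤ f c := by
      rcases hm.2.1 with he | ⟨c', hc', he⟩
      · have := hvmax (f seed) (List.mem_map_of_mem hsdc)
        omega
      · have := hvmax (f c') (List.mem_map_of_mem ((hcomp c').2 hc'))
        omega
    omega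

-- ---- the simulation invariant between A's and B's scans ----
def pvInv (b0 : List (List Int)) (W H : Nat) (sq0 : List (List Int))
    (stA : List (List Int) × List (List Int))
    (stB : PySem.Set (Int × Int) × List (Int × Int × Int)) : Prop :=
  (∀ i j : Int, 0 ≤ i → 0 ≤ j →
      pvVal stA.1 j i = if (i, j) ∈ stB.1 then 0 else pvVal b0 j i) ∧
  (∀ c ∈ stB.1, pvValid (W : Int) (H : Int) c) ∧
  (∀ q ∈ stB.2, 0 ≤ q.1 ∧ 0 ≤ q.2.1) ∧
  stA.2 = pvPaint sq0 stB.2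

lemma pvFoldlSim {α β γ : Type} (R : β → γ → Prop) (f : β → α → β) (g : γ → α → γ) :
    ∀ (l : List α), (∀ x ∈ l, ∀ sb sc, R sb sc → R (f sb x) (g sc x)) →
    ∀ sb sc, R sb sc → R (l.foldl f sb) (l.foldl g sc) := by
  intro l
  induction l with
  | nil => intro _ sb sc h; exact h
  | cons a l ih =>
    intro hstep sb sc h
    exact ih (fun x hx => hstep x (List.mem_cons_of_mem _ hx)) _ _
      (hstep a List.mem_cons_self sb sc h)

lemma pvWHtoNat (W H : Nat) : (((W : Int)) * ((H : Int))).toNat = W * H := by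
  rw [← Nat.cast_mul, Int.toNat_natCast]

lemma pvStep_glue (b0 : List (List Int)) (W H : Nat) (sq0 : List (List Int))
    {i j : Int} (hiw : 0 ≤ i ∧ i < (W : Int)) (hjh : 0 ≤ j ∧ j < (H : Int))
    {stA : List (List Int) × List (List Int)}
    {stB : PySem.Set (Int × Int) × List (Int × Int × Int)}
    (hinv : pvInv b0 W H sq0 stA stB) :
    pvInv b0 W H sq0 (pvAStep (W : Int) (H : Int) stA i j)
      (pvBStep b0 (W : Int) (H : Int) stB i j) := by
  obtain ⟨h1, h2, h3, h4⟩ := hinv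
  have hAiff : pvVal stA.1 j i = 1 ↔ (pvVal b0 j i = 1 ∧ (i, j) ∉ stB.1) := by
    rw [h1 i j hiw.1 hjh.1]
    by_cases hm : (i, j) ∈ stB.1 <;> simp [hm]
  by_cases htrig : pvVal b0 j i = 1 ∧ (i, j) ∉ stB.1
  case neg =>
    unfold pvAStep pvBStep
    rw [if_neg (fun hA => htrig (hAiff.1 hA)), if_neg htrig]
    exact ⟨h1, h2, h3, h4⟩
  case pos =>
    have hgood0 : pvGood b0 (W : Int) (H : Int) (i, j) :=
      ⟨⟨hiw.1, hiw.2, hjh.1, hjh.2⟩, by rw [htrig.1]; exact one_ne_zero⟩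
    have hTAiff : ∀ c, pvGood stA.1 (W : Int) (H : Int) c ↔
        (pvGood b0 (W : Int) (H : Int) c ∧ c ∉ stB.1) := by
      intro c
      constructor
      · rintro ⟨hv, hnz⟩
        rw [h1 c.1 c.2 hv.1 hv.2.2.1] at hnz
        by_cases hm : (c.1, c.2) ∈ stB.1
        · rw [if_pos hm] at hnz; exact absurd rfl hnz
        · rw [if_neg hm] at hnz; exact ⟨⟨hv, hnz⟩, hm⟩
      · rintro ⟨⟨hv, hnz⟩, hm⟩
        refine ⟨hv, ?_⟩
        rw [h1 c.1 c.2 hv.1 hv.2.2.1, if_neg hm]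
        exact hnz
    have hTA : pvGood stA.1 (W : Int) (H : Int) (i, j) := (hTAiff (i, j)).2 ⟨hgood0, htrig.2⟩
    have hvadd : PySem.Set.add stB.1 (i, j) = stB.1 ++ [(i, j)] :=
      PySem.Set.add_of_not_mem htrig.2
    -- B's BFS spec
    have LB := pvBfsLoop_spec b0 W H (((W : Int) * (H : Int)).toNat + 2)
      (PySem.Set.add stB.1 (i, j)) [(i, j)] [] (List.nodup_singleton _)
      (fun c hc => by
        rw [List.mem_singleton] at hc
        rw [hc]
        exact (PySem.Set.mem_add _ _ _).2 (Or.inr rfl))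
      (fun c hc => by
        rw [List.mem_singleton] at hc
        rw [hc]
        exact hgood0)
      (by
        have := pvFree_le (PySem.Set.add stB.1 (i, j)) W H
        rw [pvWHtoNat]
        simpa using this)
    -- A's find spec
    have LA := pvFindLoop_spec W H (((W : Int) * (H : Int)).toNat * 4 + 2) stA.1 i i j j [(i, j)]
      (by
        have := pvCnz_le stA.1 W H
        rw [pvWHtoNat]
        simp only [List.length_singleton]
        omega)
    have hTBiff : ∀ c, (pvGood b0 (W : Int) (H : Int) c ∧
        (c ∉ PySem.Set.add stB.1 (i, j) ∨ c ∈ [(i, j)])) ↔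
        pvGood stA.1 (W : Int) (H : Int) c := by
      intro c
      rw [hTAiff c]
      constructor
      · rintro ⟨hg, hm | hm⟩
        · exact ⟨hg, fun hv => hm ((PySem.Set.mem_add _ _ _).2 (Or.inl hv))⟩
        · rw [List.mem_singleton] at hm
          exact ⟨hg, by rw [hm]; exact htrig.2⟩
      · rintro ⟨hg, hm⟩
        by_cases hc : c = (i, j)
        · exact ⟨hg, Or.inr (by rw [List.mem_singleton]; exact hc)⟩
        · refine ⟨hg, Or.inl (fun hv => ?_)⟩
          rcases (PySem.Set.mem_add _ _ _).1 hv with hv | hv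
          · exact hm hv
          · exact hc hv
    have hRB := fun x => pvRS_congr hTBiff [(i, j)] x
    have hseedR : pvRS (pvGood stA.1 (W : Int) (H : Int)) [(i, j)] (i, j) :=
      ⟨(i, j), List.mem_singleton.2 rfl, pvRT.base _ hTA⟩
    have hcomp : ∀ x, x ∈ (pvBfsLoop b0 (W : Int) (H : Int) (((W : Int) * (H : Int)).toNat + 2)
        (PySem.Set.add stB.1 (i, j)) [(i, j)] []).2 ↔
        pvRS (pvGood stA.1 (W : Int) (H : Int)) [(i, j)] x := by
      intro x
      rw [LB.1 x, ← hRB x]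
      simp
    have hvis : ∀ x, x ∈ (pvBfsLoop b0 (W : Int) (H : Int) (((W : Int) * (H : Int)).toNat + 2)
        (PySem.Set.add stB.1 (i, j)) [(i, j)] []).1 ↔
        (x ∈ PySem.Set.add stB.1 (i, j) ∨
          pvRS (pvGood stA.1 (W : Int) (H : Int)) [(i, j)] x) := by
      intro x
      rw [LB.2 x, ← hRB x]
    unfold pvAStep pvBStep
    rw [if_pos (hAiff.2 htrig), if_pos htrig]
    simp only []
    have hl := pvMin_eq (f := Prod.fst) (seed := (i, j)) hcomp hseedR rfl LA.2.1
    have hr := pvMax_eq (f := Prod.fst) (seed := (i, j)) hcomp hseedR rfl LA.2.2.1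
    have hu := pvMin_eq (f := Prod.snd) (seed := (i, j)) hcomp hseedR rfl LA.2.2.2.1
    have hd := pvMax_eq (f := Prod.snd) (seed := (i, j)) hcomp hseedR rfl LA.2.2.2.2
    rw [hl, hr, hu, hd]
    refine ⟨?_, ?_, ?_, ?_⟩
    · intro i' j' hi' hj'
      by_cases hrch : pvRS (pvGood stA.1 (W : Int) (H : Int)) [(i, j)] (i', j')
      · rw [(LA.1 i' j' hi' hj').1 hrch,
          if_pos ((hvis (i', j')).2 (Or.inr hrch))]
      · rw [(LA.1 i' j' hi' hj').2 hrch, h1 i' j' hi' hj']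
        by_cases hm : (i', j') ∈ stB.1
        · rw [if_pos hm, if_pos ((hvis (i', j')).2
            (Or.inl ((PySem.Set.mem_add _ _ _).2 (Or.inl hm))))]
        · rw [if_neg hm, if_neg ?_]
          intro hv
          rcases (hvis (i', j')).1 hv with hv2 | hv2
          · rcases (PySem.Set.mem_add _ _ _).1 hv2 with hv3 | hv3
            · exact hm hv3
            · rw [hv3] at hrch
              exact hrch hseedR
          · exact hrch hv2
    · intro c hc
      rcases (hvis c).1 hc with hv2 | hv2
      · rcases (PySem.Set.mem_add _ _ _).1 hv2 with hv3 | hv3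
        · exact h2 c hv3
        · rw [hv3]; exact ⟨hiw.1, hiw.2, hjh.1, hjh.2⟩
      · exact ((pvRT_src hv2.choose_spec.2).2).1
    · intro q hq
      rcases List.mem_append.1 hq with hq | hq
      · exact h3 q hq
      · rw [List.mem_singleton] at hq
        subst hq
      -- the new square: its corner is a min over valid cells (or the seed)
        constructor
        · rcases LA.2.1.2.1 with he | ⟨c, hcR, he⟩
          · rw [he]; exact hiw.1
          · rw [he]; exact ((pvRT_src hcR.choose_spec.2).2).1.1
        · rcases LA.2.2.2.1.2.1 with he | ⟨c, hcR, he⟩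
          · rw [he]; exact hjh.1
          · rw [he]; exact ((pvRT_src hcR.choose_spec.2).2).1.2.2.1
    · rw [h4]
      unfold pvPaint
      rw [List.foldl_append]
      rfl

-- ===== VERDICT (by name: the statement is the Claim_ definition above) =====
theorem get_square_bitmap_spec : Claim_equal_get_square_bitmap := by
  unfold Claim_equal_get_square_bitmap Spec_get_square_bitmap
  intro b0 _ _
  set W := (b0.headD []).length with hWdef
  set H := b0.length with hHdef
  set sq0 := List.replicate H (List.replicate W (0 : Int)) with hsq0
  have hinit : pvInv b0 W H sq0 (b0, sq0)
      ((PySem.Set.empty : PySem.Set (Int × Int)), ([] : List (Int × Int × Int))) := by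
    refine ⟨?_, ?_, ?_, rfl⟩
    · intro i j _ _
      simp [PySem.Set.empty]
    · intro c hc; simp [PySem.Set.empty] at hc
    · intro q hq; cases hq
  have hstep : ∀ x ∈ PySem.List.pyRange 0 (W : Int) 1, ∀ sb sc, pvInv b0 W H sq0 sb sc →
      pvInv b0 W H sq0
        ((PySem.List.pyRange 0 (H : Int) 1).foldl
          (fun st j => pvAStep (W : Int) (H : Int) st x j) sb)
        ((PySem.List.pyRange 0 (H : Int) 1).foldl
          (fun st j => pvBStep b0 (W : Int) (H : Int) st x j) sc) := by
    intro x hx sb sc hR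
    have hxw := PySem.List.mem_pyRange_one.1 hx
    refine pvFoldlSim _ _ _ _ ?_ sb sc hR
    intro y hy sb' sc' hR'
    have hyh := PySem.List.mem_pyRange_one.1 hy
    exact pvStep_glue b0 W H sq0 ⟨hxw.1, hxw.2⟩ ⟨hyh.1, hyh.2⟩ hR'
  have hfinal := pvFoldlSim (pvInv b0 W H sq0)
    (fun st i => (PySem.List.pyRange 0 (H : Int) 1).foldl
      (fun st j => pvAStep (W : Int) (H : Int) st i j) st)
    (fun st i => (PySem.List.pyRange 0 (H : Int) 1).foldl
      (fun st j => pvBStep b0 (W : Int) (H : Int) st i j) st)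
    (PySem.List.pyRange 0 (W : Int) 1) hstep (b0, sq0)
    ((PySem.Set.empty : PySem.Set (Int × Int)), ([] : List (Int × Int × Int))) hinit
  obtain ⟨-, -, h3, h4⟩ := hfinal
  have hA : get_square_bitmap b0 =
      ((PySem.List.pyRange 0 (W : Int) 1).foldl
        (fun st i => (PySem.List.pyRange 0 (H : Int) 1).foldl
          (fun st j => pvAStep (W : Int) (H : Int) st i j) st) (b0, sq0)).2 := rfl
  have hB : get_square_bitmap_alt b0 =
      (PySem.List.pyRange 0 (H : Int) 1).map (fun j =>
        (PySem.List.pyRange 0 (W : Int) 1).map (fun i =>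
          if (((PySem.List.pyRange 0 (W : Int) 1).foldl
              (fun st i => (PySem.List.pyRange 0 (H : Int) 1).foldl
                (fun st j => pvBStep b0 (W : Int) (H : Int) st i j) st)
              ((PySem.Set.empty : PySem.Set (Int × Int)),
                ([] : List (Int × Int × Int)))).2).any
            (fun s => decide (s.1 ≤ i ∧ i < s.1 + s.2.2 ∧ s.2.1 ≤ j ∧ j < s.2.1 + s.2.2))
          then (1 : Int) else 0)) := rfl
  rw [hA, hB, h4]
  exact pvPaint_render W H _ h3
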